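-- pv_equiv track=rewrite | github.com/mapstract/medium | old_code.py | S_n_1_recursive
-- ===== SOURCE A (Python) =====
-- def S_n_1_recursive(n, d=None):
--     # this is verified as correct
--
--     ul1 = 1
--
--     one = 1
--
--     if d is None:
--         d = {1 : 1}
--
--     if n in d:
--         return d[n]
--
--     result = S_n_1_recursive(n - 1)
--     result += (n - one + 1)
--     for m in range(1, n - one + ul1):
--         tmp = (m - one + 1) * 2**(n - m - one)
--         result += tmp
--
--     for m in range(1, n - one - 1 + ul1):
--         tmp = S_n_1_recursive(n - m - 1)
--         result += tmp
--
--     d[n] = result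
--
--     return result
-- ===== SOURCE B (Python) =====
-- def S_n_1_recursive(n, d=None):
--     # Bottom-up: S(i) = 2**i - 1 + (S(1)+...+S(i-1)), kept as a running
--     # prefix sum, instead of A's unmemoized recursion.
--     if d is None:
--         d = {1: 1}
--     if n in d:
--         return d[n]
--     total = 0
--     fi = 0
--     pw = 2
--     for _ in range(1, n + 1):
--         fi = pw - 1 + total
--         total += fi
--         pw *= 2
--     result = fi
--     d[n] = result
--     return result
-- ===== Notes on version B (the rewrite author's own statement) =====
-- stated objective: alternative
-- what changed: Replaces the unmemoized recursion on n (whose recursive calls drop the memo dict) by a single bottom-up loop that keeps a running prefix sum of the previous S-values and the current power of two.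
import Mathlib
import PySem

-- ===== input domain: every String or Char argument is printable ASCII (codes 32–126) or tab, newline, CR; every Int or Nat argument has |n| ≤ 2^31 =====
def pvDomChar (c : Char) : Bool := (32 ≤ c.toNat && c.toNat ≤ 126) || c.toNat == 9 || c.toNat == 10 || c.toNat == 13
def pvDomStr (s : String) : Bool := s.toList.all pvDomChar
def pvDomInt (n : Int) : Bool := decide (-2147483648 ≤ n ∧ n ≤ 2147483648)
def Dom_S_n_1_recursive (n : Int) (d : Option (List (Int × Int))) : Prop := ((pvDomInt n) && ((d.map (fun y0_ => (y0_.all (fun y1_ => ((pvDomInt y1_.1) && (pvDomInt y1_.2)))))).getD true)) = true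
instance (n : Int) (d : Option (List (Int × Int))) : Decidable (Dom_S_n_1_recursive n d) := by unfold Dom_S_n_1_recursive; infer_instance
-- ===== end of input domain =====

-- B replaces A's unmemoized recursion by one bottom-up loop with a running prefix sum
-- (objective: alternative).  Both Pythons also store d[n] into a caller-supplied dict;
-- the equivalence proved here is about the RETURN value only (B performs the same mutation).

-- ===== PORT A =====
-- the fresh dict {1 : 1} every recursive call builds (recursive calls pass d=None)
def S_init : List (Int × Int) := [(1, 1)]

-- A's recursion, fuelled (within Pre_ the fuel n.toNat+1 used below is enough: each
-- recursive call drops the argument by at least 1 — see S_go_init_eq).  2**(n-m-1) is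
-- ported with a .toNat exponent, exact here: inside Pre_ the loop exponents are ≥ 0.
def S_go (f : Nat) (n : Int) (d : List (Int × Int)) : Int :=
  match f with
  | 0 => 0
  | f + 1 =>
    match d.find? (fun p => p.1 == n) with
    | some p => p.2
    | none =>
      let r1 := S_go f (n - 1) S_init + (n - 1 + 1)
      let r2 := (PySem.List.pyRange 1 (n - 1 + 1) 1).foldl
                  (fun r m => r + (m - 1 + 1) * 2 ^ ((n - m - 1).toNat)) r1
      (PySem.List.pyRange 1 (n - 1 - 1 + 1) 1).foldl
                  (fun r m => r + S_go f (n - m - 1) S_init) r2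

def S_n_1_recursive (n : Int) (d : Option (List (Int × Int))) : Int :=
  S_go (n.toNat + 1) n (d.getD S_init)

-- ===== PORT B =====
def S_n_1_recursive_alt (n : Int) (d : Option (List (Int × Int))) : Int :=
  let dd := d.getD [(1, 1)]
  match dd.find? (fun p => p.1 == n) with
  | some p => p.2
  | none =>
    ((PySem.List.pyRange 1 (n + 1) 1).foldl
        (fun (st : Int × Int × Int) _i =>
          let fi := st.2.2 - 1 + st.1
          (st.1 + fi, fi, st.2.2 * 2)) ((0 : Int), (0 : Int), (2 : Int))).2.1

-- ===== PRECONDITION & SPEC =====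
-- A's recursive calls pass d=None, i.e. a FRESH dict {1:1}; so unless n is a key of the
-- effective dict, A needs n ≥ 2 for the recursion to bottom out — on every other input
-- Python A raises RecursionError.  Pre_ excludes exactly those crashing inputs.
def Pre_S_n_1_recursive (n : Int) (d : Option (List (Int × Int))) : Prop :=
  2 ≤ n ∨ (d.getD [(1, 1)]).any (fun p => p.1 == n) = true
instance (n : Int) (d : Option (List (Int × Int))) : Decidable (Pre_S_n_1_recursive n d) := by
  unfold Pre_S_n_1_recursive; infer_instance

def pvWitness_S_n_1_recursive : Int × (Option (List (Int × Int))) := (5, none)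

def Spec_S_n_1_recursive (n : Int) (d : Option (List (Int × Int))) (out : Int) : Prop :=
  out = S_n_1_recursive_alt n d
instance (n : Int) (d : Option (List (Int × Int))) (out : Int) : Decidable (Spec_S_n_1_recursive n d out) := by
  unfold Spec_S_n_1_recursive; infer_instance

-- ===== CLAIM (what is proved, stated in full; the proofs are below) =====
def Claim_equal_S_n_1_recursive : Prop := ∀ (n : Int) (d : Option (List (Int × Int))), Dom_S_n_1_recursive n d → Pre_S_n_1_recursive n d → Spec_S_n_1_recursive n d (S_n_1_recursive n d)

-- ===== LEMMAS AND PROOFS =====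

-- closed form for B's loop state after k iterations: (prefix sum, S(k), 2^(k+1))
lemma S_alt_loop_eq (k : Nat) :
    (PySem.List.pyRange 1 ((k : Int) + 1) 1).foldl
        (fun (st : Int × Int × Int) _i =>
          let fi := st.2.2 - 1 + st.1
          (st.1 + fi, fi, st.2.2 * 2)) ((0 : Int), (0 : Int), (2 : Int))
    = (((k : Int) - 1) * 2 ^ k + 1, (if k = 0 then 0 else (k : Int) * 2 ^ (k - 1)), 2 ^ (k + 1)) := by
  induction k with
  | zero => simp [PySem.List.pyRange_one_eq_nil]
  | succ k ih =>
    rw [show (((k + 1 : Nat) : Int) + 1) = ((k : Int) + 1) + 1 by push_cast; ring,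
        PySem.List.pyRange_one_succ_right (by omega), List.foldl_append, ih]
    simp only [List.foldl_cons, List.foldl_nil]
    cases k with
    | zero => norm_num
    | succ j =>
      simp only [if_neg (Nat.succ_ne_zero (j + 1)), Nat.add_sub_cancel]
      refine Prod.ext ?_ (Prod.ext ?_ ?_) <;> push_cast <;> ring_nf

lemma S_sum1 (N : Nat) (init : Int) :
    ∀ k : Nat, 1 ≤ k → k ≤ N →
    (PySem.List.pyRange 1 (k : Int) 1).foldl
        (fun r m => r + (m - 1 + 1) * 2 ^ (((N : Int) - m - 1).toNat)) init
    = init + 2 ^ (N - k) * (2 ^ k - (k : Int) - 1) := by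
  intro k
  induction k with
  | zero => omega
  | succ k ih =>
    intro _ hkN
    rcases Nat.eq_zero_or_pos k with hk | hk
    · subst hk
      simp [PySem.List.pyRange_one_eq_nil]
    · rw [show ((k + 1 : Nat) : Int) = (k : Int) + 1 by push_cast; ring,
          PySem.List.pyRange_one_succ_right (by omega), List.foldl_append,
          ih hk (by omega)]
      simp only [List.foldl_cons, List.foldl_nil]
      have he : ((N : Int) - k - 1).toNat = N - k - 1 := by omega
      rw [he]
      have h1 : N - k = (N - k - 1) + 1 := by omega
      have h2 : N - (k + 1) = N - k - 1 := by omega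
      rw [h1, h2, pow_succ]
      push_cast
      ring

lemma S_sum2 (N : Nat) (hN : 2 ≤ N) (init : Int) :
    ∀ k : Nat, 1 ≤ k → k ≤ N - 1 →
    (PySem.List.pyRange 1 (k : Int) 1).foldl
        (fun r m => r + ((N : Int) - m - 1) * 2 ^ (((N : Int) - m - 2).toNat)) init
    = init + ((N : Int) - 3) * 2 ^ (N - 2) - ((N : Int) - k - 2) * 2 ^ (N - k - 1) := by
  intro k
  induction k with
  | zero => omega
  | succ k ih =>
    intro _ hkN
    rcases Nat.eq_zero_or_pos k with hk | hk
    · subst hk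
      have h1 : N - 1 - 1 = N - 2 := by omega
      simp [PySem.List.pyRange_one_eq_nil, h1]
      ring
    · rw [show ((k + 1 : Nat) : Int) = (k : Int) + 1 by push_cast; ring,
          PySem.List.pyRange_one_succ_right (by omega), List.foldl_append,
          ih hk (by omega)]
      simp only [List.foldl_cons, List.foldl_nil]
      have he : ((N : Int) - k - 2).toNat = N - k - 2 := by omega
      rw [he]
      have h1 : N - k - 1 = (N - k - 2) + 1 := by omega
      have h2 : N - (k + 1) - 1 = N - k - 2 := by omega
      rw [h1, h2, pow_succ]
      ring

lemma S_go_succ_eq (f : Nat) (N : Nat) (d : List (Int × Int))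
    (hd : d.find? (fun p => p.1 == (N : Int)) = none) (hN : 2 ≤ N)
    (H : ∀ M : Nat, 1 ≤ M → M ≤ f → S_go f (M : Int) S_init = (M : Int) * 2 ^ (M - 1))
    (hf : N - 1 ≤ f) :
    S_go (f + 1) (N : Int) d = (N : Int) * 2 ^ (N - 1) := by
  rw [S_go, hd]
  -- r1 : the recursive call on n-1
  have hc1 : ((N : Int) - 1) = ((N - 1 : Nat) : Int) := by omega
  have hr1 : S_go f ((N : Int) - 1) S_init = ((N : Int) - 1) * 2 ^ (N - 2) := by
    rw [hc1, H (N - 1) (by omega) (by omega), show (N - 1) - 1 = N - 2 by omega]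
  -- loop 1
  have hb1 : (N : Int) - 1 + 1 = ((N : Nat) : Int) := by ring
  -- loop 2 bound
  have hb2 : (N : Int) - 1 - 1 + 1 = ((N - 1 : Nat) : Int) := by omega
  simp only [hr1, hb1, hb2]
  rw [S_sum1 N _ N (by omega) (by omega)]
  rw [List.foldl_ext (fun r m => r + S_go f ((N : Int) - m - 1) S_init)
        (fun r m => r + ((N : Int) - m - 1) * 2 ^ (((N : Int) - m - 2).toNat)) _
        (by
          intro r m hm
          rw [PySem.List.mem_pyRange_one] at hm
          have hc2 : ((N - 1 : Nat) : Int) = (N : Int) - 1 := by omega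
          rw [hc2] at hm
          have hM : (N : Int) - m - 1 = (((N : Int) - m - 1).toNat : Int) := by omega
          have h2 : (((N : Int) - m - 1).toNat : Nat) - 1 = ((N : Int) - m - 2).toNat := by omega
          show r + S_go f ((N : Int) - m - 1) S_init
             = r + ((N : Int) - m - 1) * 2 ^ (((N : Int) - m - 2).toNat)
          rw [hM, H (((N : Int) - m - 1).toNat) (by omega) (by omega), h2, ← hM])]
  rw [S_sum2 N hN _ (N - 1) (by omega) (by omega)]
  have hc2 : ((N - 1 : Nat) : Int) = (N : Int) - 1 := by omega
  rw [hc2]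
  obtain ⟨K, rfl⟩ : ∃ K, N = K + 2 := ⟨N - 2, by omega⟩
  simp only [show K + 2 - 2 = K by omega, show K + 2 - 1 = K + 1 by omega,
             show K + 2 - (K + 2) = 0 by omega, show K + 2 - (K + 1) - 1 = 0 by omega,
             pow_succ, pow_zero]
  push_cast
  ring


lemma S_go_init_eq : ∀ (f N : Nat), 1 ≤ N → N ≤ f →
    S_go f (N : Int) S_init = (N : Int) * 2 ^ (N - 1) := by
  intro f
  induction f with
  | zero => omega
  | succ f ih =>
    intro N h1 h2
    by_cases hN1 : N = 1
    · subst hN1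
      simp [S_go, S_init]
    · have hN : 2 ≤ N := by omega
      have hd : S_init.find? (fun p => p.1 == (N : Int)) = none := by
        simp only [S_init, List.find?]
        have : ((1 : Int) == (N : Int)) = false := by
          simp only [beq_eq_false_iff_ne, ne_eq]
          omega
        rw [this]
      exact S_go_succ_eq f N S_init hd hN ih (by omega)

-- ===== VERDICT (by name: the statement is the Claim_ definition above) =====
theorem S_n_1_recursive_spec : Claim_equal_S_n_1_recursive := by
  intro n d _ hpre
  unfold Spec_S_n_1_recursive S_n_1_recursive S_n_1_recursive_alt
  have hdd : d.getD S_init = d.getD [(1, 1)] := rfl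
  rw [hdd]
  cases hfind : (d.getD [(1, 1)]).find? (fun p => p.1 == n) with
  | some p =>
    rw [S_go, hfind]
    simp only [hfind]
  | none =>
    have hn2 : 2 ≤ n := by
      rcases hpre with h | h
      · exact h
      · exfalso
        rw [List.any_eq_true] at h
        obtain ⟨p, hp, hpe⟩ := h
        have := List.find?_eq_none.mp hfind p hp
        exact this hpe
    have hcast : n = ((n.toNat : Nat) : Int) := by omega
    have hN : 2 ≤ n.toNat := by omega
    simp only [hfind]
    rw [hcast, Int.toNat_natCast, S_go_succ_eq n.toNat n.toNat _ (by rw [← hcast]; exact hfind) hN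
          (S_go_init_eq n.toNat) (by omega),
        S_alt_loop_eq n.toNat, if_neg (by omega)]
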